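-- pv_equiv track=rewrite | github.com/liufly/mecrf | ner.py | get_ner_dict
-- ===== SOURCE A (Python) =====
-- def get_ner_dict(data):
--     ner2idx = {}
--     for document in data:
--         for sentence in document:
--             for _, _, _, ner in sentence:
--                 if ner not in ner2idx:
--                     ner2idx[ner] = len(ner2idx)
--     return ner2idx
-- ===== SOURCE B (Python) =====
-- def get_ner_dict(data):
--     flat = [ner for document in data
--                 for sentence in document
--                 for _, _, _, ner in sentence]
--     order = sorted(set(flat), key=flat.index)
--     return dict(zip(order, range(len(order))))
-- ===== Notes on version B (the rewrite author's own statement) =====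
-- stated objective: alternative
-- what changed: Replaces the incremental check-then-insert dict loop with a collect/sort/zip pipeline: flatten all labels into one list, take its distinct labels as a set and SORT them by position of first occurrence, then pair with range() via zip; no membership test or incremental insertion remains.
import Mathlib
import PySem

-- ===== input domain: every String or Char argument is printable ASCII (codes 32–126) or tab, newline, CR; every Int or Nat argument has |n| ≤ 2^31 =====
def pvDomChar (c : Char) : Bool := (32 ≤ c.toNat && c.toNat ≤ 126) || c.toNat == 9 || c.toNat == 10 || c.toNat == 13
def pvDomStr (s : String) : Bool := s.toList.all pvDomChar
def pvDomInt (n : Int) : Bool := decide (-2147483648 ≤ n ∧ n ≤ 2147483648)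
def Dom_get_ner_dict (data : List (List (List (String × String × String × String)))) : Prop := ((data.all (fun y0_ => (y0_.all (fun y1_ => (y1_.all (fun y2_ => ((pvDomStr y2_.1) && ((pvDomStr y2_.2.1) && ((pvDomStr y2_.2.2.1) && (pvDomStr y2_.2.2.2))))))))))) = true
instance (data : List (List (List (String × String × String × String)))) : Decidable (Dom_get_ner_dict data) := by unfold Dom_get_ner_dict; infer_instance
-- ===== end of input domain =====

-- B replaces A's incremental check-then-insert loop with a collect/sort/zip pipeline:
-- flatten the labels, sort the distinct labels by first-occurrence position, zip with range.


-- ===== PORT A =====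
def get_ner_dict (data : List (List (List (String × String × String × String)))) : List (String × Int) :=
  (data.foldl (fun ner2idx document =>
    document.foldl (fun ner2idx sentence =>
      sentence.foldl (fun ner2idx tok =>
        if ner2idx.contains tok.2.2.2 then ner2idx
        else ner2idx.insert tok.2.2.2 (ner2idx.size : Int)) ner2idx) ner2idx)
    (PySem.Dict.empty : PySem.Dict String Int)).items

-- ===== PORT B =====
def get_ner_dict_alt (data : List (List (List (String × String × String × String)))) : List (String × Int) :=
  let flat := data.flatMap (fun document =>
    document.flatMap (fun sentence => sentence.map (fun tok => tok.2.2.2)))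
  let order := PySem.List.sorted (PySem.Set.ofList flat)
    (fun x => (PySem.List.index? flat x).getD 0) false
  order.zip (PySem.List.pyRange 0 (order.length : Int) 1)

-- ===== PRECONDITION & SPEC =====
def Spec_get_ner_dict (data : List (List (List (String × String × String × String)))) (out : List (String × Int)) : Prop := out = get_ner_dict_alt data
instance (data : List (List (List (String × String × String × String)))) (out : List (String × Int)) : Decidable (Spec_get_ner_dict data out) := by unfold Spec_get_ner_dict; infer_instance

-- ===== CLAIM (what is proved, stated in full; the proofs are below) =====
def Claim_equal_get_ner_dict : Prop := ∀ (data : List (List (List (String × String × String × String)))), Dom_get_ner_dict data → Spec_get_ner_dict data (get_ner_dict data)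

-- ===== LEMMAS AND PROOFS =====

-- A-side invariant: the dict A maintains, as a function of the first-seen distinct-label list
def pvConv (s : List String) : List (String × Int) :=
  (PySem.List.enumerate s).map (fun p => (p.2, p.1))

theorem pvConv_append_singleton (s : List String) (x : String) :
    pvConv (s ++ [x]) = pvConv s ++ [(x, (s.length : Int))] := by
  simp [pvConv, PySem.List.enumerate_append, PySem.List.enumerate]

theorem pvConv_map_fst (s : List String) : (pvConv s).map Prod.fst = s := by
  simp [pvConv, List.map_map, Function.comp_def]

-- one step of A's loop on a dict of the invariant shape is one Set.add on the label list
theorem pvStep (s : List String) (x : String) :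
    (if (PySem.Dict.mk (pvConv s)).contains x then PySem.Dict.mk (pvConv s)
     else (PySem.Dict.mk (pvConv s)).insert x ((PySem.Dict.mk (pvConv s)).size : Int))
    = PySem.Dict.mk (pvConv (PySem.Set.add s x)) := by
  have hc : (PySem.Dict.mk (pvConv s)).contains x = s.contains x := by
    rw [PySem.Dict.contains_eq_decide_mem_keys]
    have hk : (PySem.Dict.mk (pvConv s)).keys = s := pvConv_map_fst s
    simp [hk]
  rw [hc]
  by_cases h : s.contains x = true
  · have hm : x ∈ s := by simpa using h
    simp [PySem.Set.add, PySem.Set.contains, hm]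
  · have h' : s.contains x = false := by simpa using h
    have hnc : (PySem.Dict.mk (pvConv s)).contains x = false := by rw [hc, h']
    have hsize : (PySem.Dict.mk (pvConv s)).size = s.length := by
      simp [PySem.Dict.size, pvConv, PySem.List.length_enumerate]
    have hsc : PySem.Set.contains s x = false := by simpa [PySem.Set.contains] using h'
    simp only [h', hsc, Bool.false_eq_true, if_false, PySem.Set.add]
    apply PySem.Dict.ext
    rw [PySem.Dict.items_insert_of_not_contains _ _ hnc, hsize, pvConv_append_singleton]

theorem pvFold (xs : List String) (s : List String) :
    xs.foldl (fun d x => if d.contains x then d else d.insert x (d.size : Int))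
        (PySem.Dict.mk (pvConv s))
      = PySem.Dict.mk (pvConv (xs.foldl PySem.Set.add s)) := by
  induction xs generalizing s with
  | nil => rfl
  | cons x xs ih =>
      have h := ih (PySem.Set.add s x)
      rw [← pvStep s x] at h
      exact h

-- B-side: the distinct labels in first-seen order are already strictly increasing
-- in position of first occurrence, so Python's sort leaves them in place.
theorem pvOfList_pairwise (xs : List String) :
    (PySem.Set.ofList xs).Pairwise
      (fun a b => (PySem.List.index? xs a).getD 0 < (PySem.List.index? xs b).getD 0) := by
  induction xs using List.reverseRecOn with
  | nil => simp [PySem.Set.ofList]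
  | append_singleton xs x ih =>
      have hofl : PySem.Set.ofList (xs ++ [x]) = PySem.Set.add (PySem.Set.ofList xs) x := by
        rw [PySem.Set.ofList_eq_foldl, PySem.Set.ofList_eq_foldl, List.foldl_append]
        rfl
      have hmem : ∀ a, a ∈ PySem.Set.ofList xs → a ∈ xs := by
        intro a ha; exact (PySem.Set.mem_ofList xs a).mp ha
      have hidx : ∀ a, a ∈ xs →
          PySem.List.index? (xs ++ [x]) a = PySem.List.index? xs a :=
        fun a ha => PySem.List.index?_append_of_mem [x] ha
      have ih' : (PySem.Set.ofList xs).Pairwise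
          (fun a b => (PySem.List.index? (xs ++ [x]) a).getD 0
                    < (PySem.List.index? (xs ++ [x]) b).getD 0) := by
        refine ih.imp_of_mem ?_
        intro a b ha hb h
        rw [hidx a (hmem a ha), hidx b (hmem b hb)]
        exact h
      rw [hofl]
      by_cases hx : x ∈ xs
      · have : PySem.Set.add (PySem.Set.ofList xs) x = PySem.Set.ofList xs := by
          simp [PySem.Set.add, PySem.Set.contains, (PySem.Set.mem_ofList xs x).mpr hx]
        rw [this]; exact ih'
      · have hadd : PySem.Set.add (PySem.Set.ofList xs) x = PySem.Set.ofList xs ++ [x] := by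
          simp [PySem.Set.add, PySem.Set.contains, PySem.Set.mem_ofList, hx]
        rw [hadd, List.pairwise_append]
        refine ⟨ih', by simp, ?_⟩
        intro a ha b hb
        rw [List.mem_singleton] at hb
        rw [hb]
        have hax : a ∈ xs := hmem a ha
        obtain ⟨k, hk⟩ := Option.isSome_iff_exists.mp
          ((PySem.List.index?_isSome_iff xs a).mpr hax)
        obtain ⟨hklt, _, _⟩ := PySem.List.getElem_of_index?_eq_some hk
        rw [hidx a hax, hk, PySem.List.index?_append_singleton_self xs x hx]
        simpa using hklt

-- swapping enumerate equals zipping with a range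
theorem pvEnum_zip (s : List String) (a : Int) :
    (PySem.List.enumerate s a).map (fun p => (p.2, p.1))
      = s.zip (PySem.List.pyRange a (a + (s.length : Int)) 1) := by
  induction s generalizing a with
  | nil => simp [PySem.List.enumerate_nil, PySem.List.pyRange_one_eq_nil]
  | cons y ys ih =>
      have h1 : a + ((y :: ys).length : Int) = (a + 1) + (ys.length : Int) := by
        push_cast [List.length_cons]; ring
      have h0 : (0 : Int) ≤ (ys.length : Int) := Int.natCast_nonneg _
      rw [PySem.List.enumerate_cons, h1, PySem.List.pyRange_one_cons (by omega)]
      simp [List.zip_cons_cons, ih (a + 1)]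

-- the whole pipeline, stated over the flattened label list
theorem pvMain (flat : List String) :
    (flat.foldl (fun d x => if d.contains x then d else d.insert x (d.size : Int))
      (PySem.Dict.empty : PySem.Dict String Int)).items
    = (PySem.List.sorted (PySem.Set.ofList flat)
        (fun x => (PySem.List.index? flat x).getD 0) false).zip
      (PySem.List.pyRange 0
        (((PySem.List.sorted (PySem.Set.ofList flat)
            (fun x => (PySem.List.index? flat x).getD 0) false).length : Int)) 1) := by
  rw [PySem.List.sorted_eq_of_perm_of_pairwise_lt _ _
    (fun x => (PySem.List.index? flat x).getD 0) (List.Perm.refl _) (pvOfList_pairwise flat)]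
  have hA := pvFold flat []
  rw [show (PySem.Dict.empty : PySem.Dict String Int) = PySem.Dict.mk (pvConv []) from rfl, hA]
  rw [← PySem.Set.ofList_eq_foldl]
  have hz := pvEnum_zip (PySem.Set.ofList flat) 0
  simp only [zero_add] at hz
  exact hz

-- ===== VERDICT (by name: the statement is the Claim_ definition above) =====
theorem get_ner_dict_spec : Claim_equal_get_ner_dict := by
  intro data _
  show get_ner_dict data = get_ner_dict_alt data
  simp only [get_ner_dict, get_ner_dict_alt]
  have h := pvMain (data.flatMap (fun document =>
    document.flatMap (fun sentence => sentence.map (fun tok => tok.2.2.2))))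
  simp only [List.foldl_flatMap, List.foldl_map] at h
  exact h
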